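-- pv_equiv track=rewrite | github.com/coollabsio/coolify | templates/Epicyon/epicyon-data/git.py | _get_patch_description
-- ===== SOURCE A (Python) =====
-- def _get_patch_description(patch_str: str) -> str:
--     """Returns the description from a given patch
--     """
--     patch_lines = patch_str.split('\n')
--     description = ''
--     started = False
--     for line in patch_lines:
--         if started:
--             if line.strip() == '---':
--                 break
--             description += line + '\n'
--         if line.startswith('Subject:'):
--             started = True
--     return description
-- ===== SOURCE B (Python) =====
-- def _find_body(lines):
--     """Suffix of lines after the first line starting with 'Subject:', or None."""
--     for i, line in enumerate(lines):
--         if line.startswith('Subject:'):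
--             return lines[i + 1:]
--     return None
--
--
-- def _take_until_sep(lines):
--     """Prefix of lines before the first line that strips to '---'."""
--     for i, line in enumerate(lines):
--         if line.strip() == '---':
--             return lines[:i]
--     return lines
--
--
-- def _get_patch_description(patch_str: str) -> str:
--     """Returns the description from a given patch
--     """
--     body = _find_body(patch_str.split('\n'))
--     if body is None:
--         return ''
--     return ''.join(line + '\n' for line in _take_until_sep(body))
-- ===== Notes on version B (the rewrite author's own statement) =====
-- stated objective: simpler
-- what changed: Replaces the flag-based single pass that accumulates a string with a locate-then-collect decomposition: find the suffix after the first 'Subject:' line, cut it at the first '---' line, and join once.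
import Mathlib
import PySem

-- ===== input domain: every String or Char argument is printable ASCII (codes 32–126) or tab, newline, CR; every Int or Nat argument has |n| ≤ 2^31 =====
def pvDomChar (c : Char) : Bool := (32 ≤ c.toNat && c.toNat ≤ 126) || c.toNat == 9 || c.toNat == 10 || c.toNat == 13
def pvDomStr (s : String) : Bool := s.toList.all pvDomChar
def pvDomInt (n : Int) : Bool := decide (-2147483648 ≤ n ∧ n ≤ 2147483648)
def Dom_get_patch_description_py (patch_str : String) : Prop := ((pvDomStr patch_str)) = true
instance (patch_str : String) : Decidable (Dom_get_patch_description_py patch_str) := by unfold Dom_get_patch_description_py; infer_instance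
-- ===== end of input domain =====

-- B replaces A's flag-based accumulating pass with a locate-then-collect decomposition (objective: simpler); same O(n) cost.

-- ===== PORT A =====
-- the for-loop of A: state (description, started), break on '---' once started
def pvLoopA : List String → String → Bool → String
  | [], description, _ => description
  | line :: rest, description, started =>
    if started then
      if PySem.Str.strip line == "---" then description
      else pvLoopA rest (description ++ line ++ "\n") true
    else pvLoopA rest description (PySem.Str.startswith line "Subject:")

def get_patch_description_py (patch_str : String) : String :=
  pvLoopA (((PySem.Str.split? patch_str "\n").getD [])) "" false

-- ===== PORT B =====
-- _find_body: suffix after the first 'Subject:' line (the for/enumerate returns lines[i+1:] = rest), or None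
def pvFindBody : List String → Option (List String)
  | [] => none
  | line :: rest => if PySem.Str.startswith line "Subject:" then some rest else pvFindBody rest

-- _take_until_sep: prefix before the first line stripping to '---' (lines[:i] built structurally)
def pvTakeUntilSep : List String → List String
  | [] => []
  | line :: rest => if PySem.Str.strip line == "---" then [] else line :: pvTakeUntilSep rest

def get_patch_description_py_alt (patch_str : String) : String :=
  match pvFindBody (((PySem.Str.split? patch_str "\n").getD [])) with
  | none => ""
  | some body => PySem.Str.join "" ((pvTakeUntilSep body).map (· ++ "\n"))

-- ===== PRECONDITION & SPEC =====
def Spec_get_patch_description_py (patch_str : String) (out : String) : Prop := out = get_patch_description_py_alt patch_str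
instance (patch_str : String) (out : String) : Decidable (Spec_get_patch_description_py patch_str out) := by unfold Spec_get_patch_description_py; infer_instance

-- ===== CLAIM (what is proved, stated in full; the proofs are below) =====
def Claim_equal_get_patch_description_py : Prop := ∀ (patch_str : String), Dom_get_patch_description_py patch_str → Spec_get_patch_description_py patch_str (get_patch_description_py patch_str)

-- ===== LEMMAS AND PROOFS =====
theorem pv_join_cons (x : String) (xs : List String) :
    PySem.Str.join "" (x :: xs) = x ++ PySem.Str.join "" xs := by
  have h : (PySem.Str.join "" (x :: xs)).toList = (x ++ PySem.Str.join "" xs).toList := by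
    simp [PySem.Str.toList_join, PySem.Chars.join, List.intercalate]
    cases xs <;> simp
  exact String.toList_inj.mp h

theorem pv_join_nil : PySem.Str.join "" ([] : List String) = "" := by decide

-- once started, A's loop appends exactly the lines B keeps before the first '---'
theorem pvLoopA_true (ls : List String) (d : String) :
    pvLoopA ls d true = d ++ PySem.Str.join "" ((pvTakeUntilSep ls).map (· ++ "\n")) := by
  induction ls generalizing d with
  | nil => simp [pvLoopA, pvTakeUntilSep, pv_join_nil]
  | cons l rest ih =>
    by_cases h : PySem.Str.strip l == "---"
    · simp [pvLoopA, pvTakeUntilSep, h, pv_join_nil]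
    · simp [pvLoopA, pvTakeUntilSep, h, ih, pv_join_cons, String.append_assoc]

-- before a 'Subject:' line, A's loop accumulates nothing; at the first one it switches to started
theorem pvLoopA_false (ls : List String) :
    pvLoopA ls "" false =
      match pvFindBody ls with
      | none => ""
      | some body => PySem.Str.join "" ((pvTakeUntilSep body).map (· ++ "\n")) := by
  induction ls with
  | nil => simp [pvLoopA, pvFindBody]
  | cons l rest ih =>
    cases h : PySem.Str.startswith l "Subject:" with
    | true =>
      simp only [pvLoopA, pvFindBody, h]
      simp [pvLoopA_true]
    | false =>
      simp only [pvLoopA, pvFindBody, h]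
      simpa using ih

-- ===== VERDICT (by name: the statement is the Claim_ definition above) =====
theorem get_patch_description_py_spec : Claim_equal_get_patch_description_py := by
  intro patch_str _
  unfold Spec_get_patch_description_py get_patch_description_py get_patch_description_py_alt
  rw [pvLoopA_false]
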